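-- pv_equiv track=rewrite | github.com/George-Polya/backtest-simulation | backend/services/code_generator.py | _unescape_newlines_only
-- ===== SOURCE A (Python) =====
-- def _unescape_newlines_only(s: str) -> str:
--     """
--     Unescape backslash-n sequences to actual newlines.
--
--     Handles both single backslash-n and double backslash-n:
--     - \\n (one backslash + n) → newline
--     - \\\\n (two backslashes + n) → one backslash + newline (which becomes just newline in next pass)
--
--     Args:
--         s: The string to unescape
--
--     Returns:
--         The string with one level of backslash-n converted to newlines
--     """
--     result = []
--     i = 0
--     while i < len(s):
--         # Check for backslash
--         if s[i] == '\\' and i + 1 < len(s):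
--             next_char = s[i + 1]
--             if next_char == 'n':
--                 # \n → newline
--                 result.append('\n')
--                 i += 2
--             elif next_char == '\\' and i + 2 < len(s) and s[i + 2] == 'n':
--                 # \\n → newline (skip both backslashes)
--                 result.append('\n')
--                 i += 3
--             else:
--                 # Other escape, keep as-is
--                 result.append(s[i])
--                 i += 1
--         else:
--             result.append(s[i])
--             i += 1
--     return ''.join(result)
-- ===== SOURCE B (Python) =====
-- import re
--
-- def _unescape_newlines_only(s: str) -> str:
--     return re.sub(r'\\\\?n', '\n', s)
-- ===== Notes on version B (the rewrite author's own statement) =====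
-- stated objective: idiomatic
-- what changed: Replaced the hand-written while-loop index scanner (explicit i, look-ahead branches, i += 1/2/3) with a single regular-expression substitution re.sub(r'\\\\?n', '\n', s): the regex engine does the leftmost-greedy scan, one optional-backslash pattern covers both escape forms.
import Mathlib
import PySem

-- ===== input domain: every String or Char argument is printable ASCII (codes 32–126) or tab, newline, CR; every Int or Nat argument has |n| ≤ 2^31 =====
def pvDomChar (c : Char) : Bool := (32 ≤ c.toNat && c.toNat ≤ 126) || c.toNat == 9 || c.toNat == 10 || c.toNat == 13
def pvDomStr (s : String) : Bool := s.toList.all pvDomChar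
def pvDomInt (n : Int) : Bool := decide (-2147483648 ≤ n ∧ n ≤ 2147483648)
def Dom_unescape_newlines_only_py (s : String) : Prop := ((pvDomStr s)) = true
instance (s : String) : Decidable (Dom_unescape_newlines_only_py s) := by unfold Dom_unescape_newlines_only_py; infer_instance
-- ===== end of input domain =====

-- B replaces A's manual index-arithmetic character scanner with a single regex
-- substitution re.sub(r'\\\\?n', '\n', s) (idiomatic); return values proved equal.

-- ===== PORT A =====
-- A's while-loop over index i, transcribed as recursion on the character list; the
-- patterns are A's branches in A's order (earlier pattern = earlier branch), and each
-- consumes exactly the characters its branch consumes (i += 2, i += 3, i += 1).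
def pvGoA : List Char → List Char
  | [] => []                                   -- i < len(s) fails
  | '\\' :: 'n' :: r => '\n' :: pvGoA r        -- s[i]=='\\', next_char=='n': append '\n', i += 2
  | '\\' :: '\\' :: 'n' :: r => '\n' :: pvGoA r -- next_char=='\\' and s[i+2]=='n': '\n', i += 3
  | '\\' :: rest => '\\' :: pvGoA rest         -- other escape (or i+1 ≥ len): keep s[i], i += 1
  | c :: rest => c :: pvGoA rest               -- non-backslash: append s[i], i += 1

def unescape_newlines_only_py (s : String) : String :=
  String.ofList (pvGoA s.toList)               -- ''.join(result)

-- ===== PORT B =====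
-- Hand port of re.sub(r'\\\\?n', '\n', s) (PySem has no regex primitive), exact to
-- Python's semantics for this pattern: find the LEFTMOST match (the optional second
-- backslash taken greedily, with backtracking), emit the unmatched prefix plus the
-- replacement '\n', and continue scanning after the match; no match leaves the rest as is.
-- pvFind cs = some (prefix before the leftmost match of \\\\?n, suffix after it), or none.
def pvFind : List Char → Option (List Char × List Char)
  | '\\' :: '\\' :: 'n' :: r => some ([], r)   -- greedy: both backslashes + n
  | '\\' :: 'n' :: r => some ([], r)           -- backtrack: one backslash + n
  | c :: r => (pvFind r).map (fun pq => (c :: pq.1, pq.2))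
  | [] => none

theorem pvFind_length : ∀ (cs p r : List Char), pvFind cs = some (p, r) → r.length < cs.length := by
  intro cs
  fun_induction pvFind cs with
  | case1 r => intro p q h; simp_all; omega
  | case2 r => intro p q h; simp_all
  | case3 c r h1 h2 ih =>
      intro p q h
      simp only [Option.map_eq_some_iff] at h
      obtain ⟨⟨p', q'⟩, hf, he⟩ := h
      have := ih p' q' hf
      cases he; simp; omega
  | case4 => intro p q h; simp at h

def pvGoB (cs : List Char) : List Char :=
  match h : pvFind cs with
  | none => cs                                 -- no match: rest unchanged
  | some (p, r) => p ++ '\n' :: pvGoB r        -- prefix, replacement, continue after match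
  termination_by cs.length
  decreasing_by exact pvFind_length cs p r h

def unescape_newlines_only_py_alt (s : String) : String :=
  String.ofList (pvGoB s.toList)

-- ===== PRECONDITION & SPEC =====
def Spec_unescape_newlines_only_py (s : String) (out : String) : Prop := out = unescape_newlines_only_py_alt s
instance (s : String) (out : String) : Decidable (Spec_unescape_newlines_only_py s out) := by unfold Spec_unescape_newlines_only_py; infer_instance

-- ===== CLAIM (what is proved, stated in full; the proofs are below) =====
def Claim_equal_unescape_newlines_only_py : Prop := ∀ (s : String), Dom_unescape_newlines_only_py s → Spec_unescape_newlines_only_py s (unescape_newlines_only_py s)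

-- ===== LEMMAS AND PROOFS =====

theorem pvGoB_none {cs : List Char} (h : pvFind cs = none) : pvGoB cs = cs := by
  rw [pvGoB]; split <;> simp_all

theorem pvGoB_some {cs p r : List Char} (h : pvFind cs = some (p, r)) :
    pvGoB cs = p ++ '\n' :: pvGoB r := by
  rw [pvGoB]; split <;> simp_all

-- unfolding pvFind past a character that cannot start a match
theorem pvFind_cons_of_ne {c : Char} {cs : List Char} (hc : c = '\\' → False) :
    pvFind (c :: cs) = (pvFind cs).map (fun pq => (c :: pq.1, pq.2)) := by
  rw [pvFind.eq_def]; split <;> simp_all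

theorem pvFind_cons_bs {rest : List Char}
    (h1 : ∀ r, rest = 'n' :: r → False) (h2 : ∀ r, rest = '\\' :: 'n' :: r → False) :
    pvFind ('\\' :: rest) = (pvFind rest).map (fun pq => (('\\' : Char) :: pq.1, pq.2)) := by
  rw [pvFind.eq_def]
  split <;> simp_all
  rename_i heq
  obtain ⟨rfl, rfl⟩ := heq
  rfl

-- pvGoB commutes with prepending a character that starts no match.
theorem pvGoB_cons {c : Char} {cs : List Char}
    (h : pvFind (c :: cs) = (pvFind cs).map (fun pq => (c :: pq.1, pq.2))) :
    pvGoB (c :: cs) = c :: pvGoB cs := by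
  cases hf : pvFind cs with
  | none =>
      rw [pvGoB_none (by rw [h, hf]; rfl), pvGoB_none hf]
  | some pr =>
      obtain ⟨p, r⟩ := pr
      rw [pvGoB_some (show pvFind (c :: cs) = some (c :: p, r) by rw [h, hf]; rfl),
          pvGoB_some hf]
      simp

theorem pvGoA_eq_pvGoB : ∀ (cs : List Char), pvGoA cs = pvGoB cs := by
  intro cs
  fun_induction pvGoA cs with
  | case1 => rw [pvGoB_none rfl]
  | case2 r ih => rw [pvGoB_some rfl]; simpa using ih
  | case3 r ih => rw [pvGoB_some rfl]; simpa using ih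
  | case4 rest h1 h2 ih => rw [pvGoB_cons (pvFind_cons_bs h1 h2), ih]
  | case5 c rest h1 h2 h3 ih => rw [pvGoB_cons (pvFind_cons_of_ne h3), ih]

-- ===== VERDICT (by name: the statement is the Claim_ definition above) =====
theorem unescape_newlines_only_py_spec : Claim_equal_unescape_newlines_only_py := by
  intro s _
  unfold Spec_unescape_newlines_only_py unescape_newlines_only_py unescape_newlines_only_py_alt
  rw [pvGoA_eq_pvGoB]
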